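-- pv_equiv track=rewrite | github.com/lurk-cli/lurk | lurk/src/lurk/observers/screenshot_observer.py | _truncate_screen_text
-- ===== SOURCE A (Python) =====
-- def _truncate_screen_text(text: str, max_chars: int = 1500) -> str:
--     """Truncate OCR text intelligently — keep meaningful lines, drop noise."""
--     lines = text.split("\n")
--     # Filter out very short lines (UI chrome, icons) and blank lines
--     meaningful = [l for l in lines if len(l.strip()) > 3]
--     if not meaningful:
--         meaningful = lines
--
--     result = []
--     chars = 0
--     for line in meaningful:
--         if chars + len(line) + 1 > max_chars:
--             break
--         result.append(line)
--         chars += len(line) + 1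
--
--     return "\n".join(result)
-- ===== SOURCE B (Python) =====
-- def _truncate_screen_text(text: str, max_chars: int = 1500) -> str:
--     """Truncate OCR text: keep meaningful lines whose cumulative size fits."""
--     lines = text.split("\n")
--     meaningful = [l for l in lines if len(l.strip()) > 3] or lines
--     # Prefix-sum table: totals[i] = total chars used once lines 0..i are joined
--     # (each line costs len(line)+1 for it plus a separator/terminator).
--     totals = []
--     running = 0
--     for l in meaningful:
--         running = running + len(l) + 1
--         totals.append(running)
--     # totals is strictly increasing, so filtering by the budget keeps exactly
--     # the prefix of lines that fit.
--     kept = [l for l, c in zip(meaningful, totals) if c <= max_chars]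
--     return "\n".join(kept)
-- ===== Notes on version B (the rewrite author's own statement) =====
-- stated objective: alternative
-- what changed: Replaces A's stateful accumulate-and-break loop by materialising a cumulative-length prefix table and selecting the kept lines with a zip-based filter against the budget (correct because the table is strictly increasing).
import Mathlib
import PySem

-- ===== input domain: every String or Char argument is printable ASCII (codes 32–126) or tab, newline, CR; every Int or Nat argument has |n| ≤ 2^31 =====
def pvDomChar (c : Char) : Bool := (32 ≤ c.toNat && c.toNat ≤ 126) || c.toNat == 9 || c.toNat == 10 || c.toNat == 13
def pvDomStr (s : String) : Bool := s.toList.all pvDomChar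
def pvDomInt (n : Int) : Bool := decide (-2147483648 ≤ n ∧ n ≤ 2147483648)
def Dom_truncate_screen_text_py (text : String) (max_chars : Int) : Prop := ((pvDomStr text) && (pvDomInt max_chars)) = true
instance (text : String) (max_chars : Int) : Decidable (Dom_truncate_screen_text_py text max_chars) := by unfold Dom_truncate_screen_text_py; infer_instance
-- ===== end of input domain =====

-- B replaces A's accumulate-and-break loop with a materialised cumulative-length
-- prefix table and a zip-based filter against the budget (alternative decomposition).


-- ===== PORT A =====
-- A's for-loop with break: recursion carrying the running `chars` counter.
def pvALoop (maxc : Int) : List String → Int → List String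
  | [], _ => []
  | l :: rest, chars =>
    if chars + (PySem.Str.len l : Int) + 1 > maxc then []
    else l :: pvALoop maxc rest (chars + (PySem.Str.len l : Int) + 1)

def truncate_screen_text_py (text : String) (max_chars : Int) : String :=
  let lines := (PySem.Str.split? text "\n").getD []  -- sep is the nonempty literal "\n", so split? is some
  let meaningful := lines.filter (fun l => (PySem.Str.len (PySem.Str.strip l) : Int) > 3)
  let meaningful := if meaningful = [] then lines else meaningful
  PySem.Str.join "\n" (pvALoop max_chars meaningful 0)

-- ===== PORT B =====
-- B: build the prefix-sum table `totals` (loop appending the running total),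
-- then keep via a zip-based filter the lines whose cumulative total fits.
def truncate_screen_text_py_alt (text : String) (max_chars : Int) : String :=
  let lines := (PySem.Str.split? text "\n").getD []  -- sep is the nonempty literal "\n", so split? is some
  let meaningful := lines.filter (fun l => (PySem.Str.len (PySem.Str.strip l) : Int) > 3)
  let meaningful := if meaningful = [] then lines else meaningful
  let totals := (meaningful.foldl
    (fun (p : List Int × Int) l =>
      let r := p.2 + (PySem.Str.len l : Int) + 1
      (p.1 ++ [r], r)) ([], 0)).1
  let kept := ((meaningful.zip totals).filter (fun p => p.2 ≤ max_chars)).map Prod.fst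
  PySem.Str.join "\n" kept

-- ===== PRECONDITION & SPEC =====
def Spec_truncate_screen_text_py (text : String) (max_chars : Int) (out : String) : Prop := out = truncate_screen_text_py_alt text max_chars
instance (text : String) (max_chars : Int) (out : String) : Decidable (Spec_truncate_screen_text_py text max_chars out) := by unfold Spec_truncate_screen_text_py; infer_instance

-- ===== CLAIM (what is proved, stated in full; the proofs are below) =====
def Claim_equal_truncate_screen_text_py : Prop := ∀ (text : String) (max_chars : Int), Dom_truncate_screen_text_py text max_chars → Spec_truncate_screen_text_py text max_chars (truncate_screen_text_py text max_chars)

-- ===== LEMMAS AND PROOFS =====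

-- recursive characterisation of the prefix-sum table starting at c
def pvCum (c : Int) : List String → List Int
  | [] => []
  | l :: rest => (c + (PySem.Str.len l : Int) + 1) :: pvCum (c + (PySem.Str.len l : Int) + 1) rest

theorem pvTotals_eq (ls : List String) : ∀ (acc : List Int) (c : Int),
    (ls.foldl (fun (p : List Int × Int) l =>
      let r := p.2 + (PySem.Str.len l : Int) + 1
      (p.1 ++ [r], r)) (acc, c)).1 = acc ++ pvCum c ls := by
  induction ls with
  | nil => intro acc c; simp [pvCum]
  | cons l rest ih =>
      intro acc c
      simp only [List.foldl_cons, pvCum]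
      rw [ih]
      simp

theorem pvCum_lt (c : Int) (ls : List String) : ∀ x ∈ pvCum c ls, c < x := by
  induction ls generalizing c with
  | nil => intro x hx; simp [pvCum] at hx
  | cons l rest ih =>
      intro x hx
      simp only [pvCum, List.mem_cons] at hx
      rcases hx with h | h
      · have : (0 : Int) ≤ (PySem.Str.len l : Int) := Int.natCast_nonneg _
        omega
      · have := ih _ x h
        have : (0 : Int) ≤ (PySem.Str.len l : Int) := Int.natCast_nonneg _
        omega

theorem pvALoop_eq (maxc : Int) (ls : List String) : ∀ (c : Int),
    pvALoop maxc ls c =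
      ((ls.zip (pvCum c ls)).filter (fun p => p.2 ≤ maxc)).map Prod.fst := by
  induction ls with
  | nil => intro c; simp [pvALoop, pvCum]
  | cons l rest ih =>
      intro c
      simp only [pvALoop, pvCum, List.zip_cons_cons, List.filter_cons]
      by_cases h : c + (PySem.Str.len l : Int) + 1 > maxc
      · rw [if_pos h]
        have hnil : ((rest.zip (pvCum (c + (PySem.Str.len l : Int) + 1) rest)).filter
            (fun p => p.2 ≤ maxc)) = [] := by
          rw [List.filter_eq_nil_iff]
          intro p hp
          have hmem := (List.of_mem_zip hp).2
          have := pvCum_lt _ _ _ hmem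
          simp only [decide_eq_true_eq]
          omega
        have hd : (decide ((l, c + (PySem.Str.len l : Int) + 1).2 ≤ maxc)) = false := by
          simp only [decide_eq_false_iff_not]
          omega
        rw [hd, hnil]
        simp
      · rw [if_neg h]
        have hd : (decide ((l, c + (PySem.Str.len l : Int) + 1).2 ≤ maxc)) = true := by
          simp only [decide_eq_true_eq]
          omega
        rw [hd]
        simp only [if_true, List.map_cons]
        rw [ih]

-- ===== VERDICT (by name: the statement is the Claim_ definition above) =====
theorem truncate_screen_text_py_spec : Claim_equal_truncate_screen_text_py := by
  intro text max_chars _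
  unfold Spec_truncate_screen_text_py truncate_screen_text_py truncate_screen_text_py_alt
  simp only []
  rw [pvTotals_eq, List.nil_append, pvALoop_eq]
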